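-- pv_equiv track=rewrite | github.com/Macri-man/ProgrammingProblems | LeetCode/3301-3400/Problem3333_FindtheOriginalTypedStringII/FindtheOriginalTypedStringII.py | groups_to_poly
-- ===== SOURCE A (Python) =====
-- MOD = 10**9 + 7
--
-- def groups_to_poly(groups):
--     max_sum = sum(g - 1 for g in groups)
--     dp = [0] * (max_sum + 1)
--     dp[0] = 1
--
--     new_dp = [0] * (max_sum + 1)
--     prefix = [0] * (max_sum + 2)  # prefix sums
--
--     for g in groups:
--         bound = g - 1
--         running_sum = 0
--
--         # Compute prefix sums with rolling window to optimize dp update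
--         # Reuse prefix array to avoid reallocation
--         prefix[0] = 0
--         for i in range(len(dp)):
--             prefix[i+1] = (prefix[i] + dp[i]) % MOD
--
--         for i in range(len(dp)):
--             left = i - bound
--             if left < 0:
--                 left = 0
--             # sum dp[left..i] = prefix[i+1] - prefix[left]
--             val = prefix[i+1] - prefix[left]
--             # Avoid negative modulo:
--             if val < 0:
--                 val += MOD
--             new_dp[i] = val
--
--         dp, new_dp = new_dp, dp  # swap references to reuse lists, avoid allocations
--
--     return dp
-- ===== SOURCE B (Python) =====
-- MOD = 10**9 + 7
--
-- def groups_to_poly(groups):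
--     # Numerator/denominator factorization: prod (1+x+...+x^{g-1}) = prod (1-x^g) / (1-x)^n.
--     # Multiply in each (1 - x^g) with an in-place descending subtract-shift pass,
--     # then divide by (1-x)^n with n in-place cumulative-sum passes.
--     max_sum = sum(g - 1 for g in groups)
--     L = max_sum + 1
--     poly = [1] + [0] * (L - 1)
--     for g in groups:
--         for i in range(L - 1, g - 1, -1):
--             poly[i] = (poly[i] - poly[i - g]) % MOD
--     for _ in range(len(groups)):
--         for i in range(1, L):
--             poly[i] = (poly[i] + poly[i - 1]) % MOD
--     return poly
-- ===== Notes on version B (the rewrite author's own statement) =====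
-- stated objective: alternative
-- what changed: Instead of convolving each group's (1+x+...+x^{g-1}) via per-group prefix-sum sliding windows into a fresh buffer, B multiplies the numerator prod(1-x^g) with in-place descending subtract-shift passes and then divides by (1-x)^n with n in-place cumulative-sum passes.
import Mathlib
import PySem

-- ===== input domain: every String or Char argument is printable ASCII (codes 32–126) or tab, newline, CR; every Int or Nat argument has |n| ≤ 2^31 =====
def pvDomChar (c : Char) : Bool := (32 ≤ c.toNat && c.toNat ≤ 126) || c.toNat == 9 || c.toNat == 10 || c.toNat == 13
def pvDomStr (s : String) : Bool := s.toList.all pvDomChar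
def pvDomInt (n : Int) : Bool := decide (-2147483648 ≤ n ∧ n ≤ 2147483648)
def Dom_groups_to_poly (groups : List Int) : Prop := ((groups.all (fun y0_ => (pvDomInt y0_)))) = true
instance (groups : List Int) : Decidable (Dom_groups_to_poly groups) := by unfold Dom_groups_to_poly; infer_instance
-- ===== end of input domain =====

-- B replaces A's per-group prefix-sum sliding-window convolution by multiplying the numerator
-- ∏(1-x^g) with in-place descending subtract-shift passes and then dividing by (1-x)^n with n
-- in-place cumulative-sum passes (objective: alternative algorithm, same asymptotic cost).

-- ===== PORT A =====
def pvM : Int := 1000000007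

-- inner loop 1 of A: prefix[i+1] = (prefix[i] + dp[i]) % MOD for i in range(len(dp))
def pvPrefLoop (dp pf : List Int) : List Int :=
  (PySem.List.pyRange 0 (dp.length : Int) 1).foldl
    (fun pf i => pf.set (i + 1).toNat (PySem.Int.mod (pf.getD i.toNat 0 + dp.getD i.toNat 0) pvM)) pf

-- inner loop 2 of A: new_dp[i] = prefix[i+1]-prefix[left] (made non-negative), left = max(0, i-bound)
def pvWinLoop (dp pf : List Int) (bound : Int) (nd : List Int) : List Int :=
  (PySem.List.pyRange 0 (dp.length : Int) 1).foldl
    (fun nd i =>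
      let left := i - bound
      let left := if left < 0 then 0 else left
      let val := pf.getD (i + 1).toNat 0 - pf.getD left.toNat 0
      let val := if val < 0 then val + pvM else val
      nd.set i.toNat val) nd

-- Python raises IndexError when max_sum < 0 or some g < 0 (prefix read out of range); Pre_ excludes those.
-- A reuses the 'prefix' and 'new_dp' buffers across iterations (each pass fully overwrites what it reads);
-- ported functionally by threading both buffers through the fold, exactly as the swap does.
def groups_to_poly (groups : List Int) : List Int :=
  let max_sum := (groups.map (fun g => g - 1)).sum
  let dp := (List.replicate (max_sum + 1).toNat (0 : Int)).set 0 1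
  let new_dp := List.replicate (max_sum + 1).toNat (0 : Int)
  let pf := List.replicate (max_sum + 2).toNat (0 : Int)
  let st := groups.foldl
    (fun (st : (List Int × List Int) × List Int) g =>
      let dp := st.1.1
      let bound := g - 1
      let pf := pvPrefLoop dp (st.2.set 0 0)
      let new_dp := pvWinLoop dp pf bound st.1.2
      ((new_dp, dp), pf)) ((dp, new_dp), pf)
  st.1.1

-- ===== PORT B =====
-- numerator pass: poly[i] = (poly[i] - poly[i-g]) % MOD for i in range(L-1, g-1, -1)
def pvSubLoop (L g : Int) (p : List Int) : List Int :=
  (PySem.List.pyRange (L - 1) (g - 1) (-1)).foldl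
    (fun p i => p.set i.toNat (PySem.Int.mod (p.getD i.toNat 0 - p.getD (i - g).toNat 0) pvM)) p

-- division pass: poly[i] = (poly[i] + poly[i-1]) % MOD for i in range(1, L)
def pvCumLoop (L : Int) (p : List Int) : List Int :=
  (PySem.List.pyRange 1 L 1).foldl
    (fun p i => p.set i.toNat (PySem.Int.mod (p.getD i.toNat 0 + p.getD (i - 1).toNat 0) pvM)) p

def groups_to_poly_alt (groups : List Int) : List Int :=
  let max_sum := (groups.map (fun g => g - 1)).sum
  let L := max_sum + 1
  let poly := 1 :: List.replicate (L - 1).toNat (0 : Int)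
  let poly := groups.foldl (fun p g => pvSubLoop L g p) poly
  (PySem.List.pyRange 0 (groups.length : Int) 1).foldl (fun p _ => pvCumLoop L p) poly

-- ===== PRECONDITION & SPEC =====
-- Exactly the inputs on which Python A returns: every group size is ≥ 0 (a negative g makes A read
-- prefix[] out of range → IndexError) and sum(g-1) ≥ 0 (else dp gets non-positive length and dp[0]=1 raises IndexError).
def Pre_groups_to_poly (groups : List Int) : Prop :=
  (∀ g ∈ groups, 0 ≤ g) ∧ 0 ≤ (groups.map (fun g => g - 1)).sum
instance (groups : List Int) : Decidable (Pre_groups_to_poly groups) := by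
  unfold Pre_groups_to_poly; infer_instance

def pvWitness_groups_to_poly : List Int := [2, 3]

def Spec_groups_to_poly (groups : List Int) (out : List Int) : Prop := out = groups_to_poly_alt groups
instance (groups : List Int) (out : List Int) : Decidable (Spec_groups_to_poly groups out) := by
  unfold Spec_groups_to_poly; infer_instance

-- ===== CLAIM (what is proved, stated in full; the proofs are below) =====
def Claim_equal_groups_to_poly : Prop := ∀ (groups : List Int), Dom_groups_to_poly groups → Pre_groups_to_poly groups → Spec_groups_to_poly groups (groups_to_poly groups)


-- ===== LEMMAS AND PROOFS =====

-- working modulus facts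
theorem pvM_pos : (0 : Int) < pvM := by norm_num [pvM]

theorem cast_pymod (a : Int) :
    ((PySem.Int.mod a pvM : Int) : ZMod 1000000007) = (a : ZMod 1000000007) := by
  rw [PySem.Int.mod_eq_emod_of_pos pvM_pos]
  have h : (pvM : Int) = ((1000000007 : ℕ) : Int) := by norm_num [pvM]
  rw [h, ZMod.intCast_mod]

theorem pymod_bounds (a : Int) :
    0 ≤ PySem.Int.mod a pvM ∧ PySem.Int.mod a pvM < pvM :=
  ⟨PySem.Int.mod_nonneg a pvM_pos, PySem.Int.mod_lt a pvM_pos⟩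

theorem castM_zero : ((pvM : Int) : ZMod 1000000007) = 0 := by
  have h : (pvM : Int) = ((1000000007 : ℕ) : Int) := by norm_num [pvM]
  rw [h]
  exact_mod_cast ZMod.natCast_self 1000000007

-- getD after set
theorem getD_set' (l : List Int) (j : ℕ) (v : Int) (k : ℕ) :
    (l.set j v).getD k 0 = if j = k ∧ j < l.length then v else l.getD k 0 := by
  simp only [List.getD_eq_getElem?_getD, List.getElem?_set]
  split_ifs with h1 h2 h3 h4 <;> simp_all
  omega

-- the mod-1e9+7 residue sequence of a list, and sequence-level operators
def phiZ (l : List Int) : ℕ → ZMod 1000000007 := fun i => ((l.getD i 0 : Int) : ZMod 1000000007)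
def PfS (p : ℕ → ZMod 1000000007) (k : ℕ) : ZMod 1000000007 := ∑ j ∈ Finset.range k, p j
def Cs (p : ℕ → ZMod 1000000007) : ℕ → ZMod 1000000007 := fun i => PfS p (i + 1)
def Ss (g : ℕ) (p : ℕ → ZMod 1000000007) : ℕ → ZMod 1000000007 :=
  fun i => p i - (if g ≤ i then p (i - g) else 0)
def Ws (g : ℕ) (p : ℕ → ZMod 1000000007) : ℕ → ZMod 1000000007 :=
  fun i => PfS p (i + 1) - PfS p (i + 1 - g)
def InR (l : List Int) : Prop := ∀ k : ℕ, 0 ≤ l.getD k 0 ∧ l.getD k 0 < pvM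
def Agr (L : ℕ) (p q : ℕ → ZMod 1000000007) : Prop := ∀ i, i < L → p i = q i

-- sequence algebra: (1+…+x^{g-1}) = (1-x^g)/(1-x), i.e. Ws g = Cs ∘ Ss g = Ss g ∘ Cs

theorem PfS_zero (p : ℕ → ZMod 1000000007) : PfS p 0 = 0 := by simp [PfS]
theorem PfS_succ (p : ℕ → ZMod 1000000007) (k : ℕ) : PfS p (k + 1) = PfS p k + p k :=
  Finset.sum_range_succ p k

theorem PfS_Ss (g : ℕ) (p : ℕ → ZMod 1000000007) (k : ℕ) :
    PfS (Ss g p) k = PfS p k - PfS p (k - g) := by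
  induction k with
  | zero => simp [PfS_zero]
  | succ k ih =>
    rw [PfS_succ, ih]
    show PfS p k - PfS p (k - g) + (p k - if g ≤ k then p (k - g) else 0)
      = PfS p (k + 1) - PfS p (k + 1 - g)
    by_cases h : g ≤ k
    · rw [show k + 1 - g = (k - g) + 1 by omega, PfS_succ, PfS_succ, if_pos h]; ring
    · rw [show k - g = 0 by omega, show k + 1 - g = 0 by omega, PfS_succ, if_neg h]; ring
theorem Cs_Ss (g : ℕ) (p : ℕ → ZMod 1000000007) : Cs (Ss g p) = Ws g p := by
  funext i; rw [Cs, Ws, PfS_Ss]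
theorem Ss_Cs (g : ℕ) (p : ℕ → ZMod 1000000007) : Ss g (Cs p) = Ws g p := by
  funext i
  show Cs p i - (if g ≤ i then Cs p (i - g) else 0) = PfS p (i + 1) - PfS p (i + 1 - g)
  by_cases h : g ≤ i
  · rw [if_pos h]; show PfS p (i+1) - PfS p (i - g + 1) = _
    rw [show i - g + 1 = i + 1 - g by omega]
  · rw [if_neg h, show i + 1 - g = 0 by omega, PfS_zero]; rfl
theorem Ss_iter_Cs (g : ℕ) (k : ℕ) (p : ℕ → ZMod 1000000007) :
    Ss g (Cs^[k] p) = Cs^[k] (Ss g p) := by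
  induction k generalizing p with
  | zero => rfl
  | succ k ih =>
    rw [Function.iterate_succ_apply', Function.iterate_succ_apply', Ss_Cs, ← Cs_Ss, ih]
theorem chainWS (gs : List Int) : ∀ (k : ℕ) (p : ℕ → ZMod 1000000007),
    gs.foldl (fun q g => Ws g.toNat q) (Cs^[k] p)
      = Cs^[k + gs.length] (gs.foldl (fun q g => Ss g.toNat q) p) := by
  induction gs with
  | nil => intro k p; simp
  | cons g tl ih =>
    intro k p
    have h1 : Ws g.toNat (Cs^[k] p) = Cs^[k + 1] (Ss g.toNat p) := by
      rw [← Cs_Ss, Ss_iter_Cs]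
      exact (Function.iterate_succ_apply' Cs k (Ss g.toNat p)).symm
    simp only [List.foldl_cons, h1, ih]
    rw [show k + 1 + tl.length = k + (g :: tl).length by simp; omega]

-- Agr congruences
theorem Agr_PfS {L : ℕ} {p q : ℕ → ZMod 1000000007} (h : Agr L p q) :
    ∀ k, k ≤ L → PfS p k = PfS q k := by
  intro k hk
  unfold PfS
  apply Finset.sum_congr rfl
  intro j hj
  exact h j (by simp at hj; omega)
theorem Agr_Ws {L : ℕ} {p q : ℕ → ZMod 1000000007} (h : Agr L p q) (g : ℕ) :
    Agr L (Ws g p) (Ws g q) := by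
  intro i hi
  unfold Ws
  rw [Agr_PfS h (i + 1) (by omega), Agr_PfS h (i + 1 - g) (by omega)]
theorem Agr_Ss {L : ℕ} {p q : ℕ → ZMod 1000000007} (h : Agr L p q) (g : ℕ) :
    Agr L (Ss g p) (Ss g q) := by
  intro i hi
  unfold Ss
  rw [h i hi]
  by_cases hgi : g ≤ i
  · rw [if_pos hgi, if_pos hgi, h (i - g) (by omega)]
  · rw [if_neg hgi, if_neg hgi]
theorem Agr_Cs {L : ℕ} {p q : ℕ → ZMod 1000000007} (h : Agr L p q) :
    Agr L (Cs p) (Cs q) := by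
  intro i hi
  unfold Cs
  rw [Agr_PfS h (i + 1) (by omega)]
def PInt (dp : List Int) : ℕ → Int
  | 0 => 0
  | k + 1 => PySem.Int.mod (PInt dp k + dp.getD k 0) pvM
def CInt (l : List Int) : ℕ → Int
  | 0 => l.getD 0 0
  | k + 1 => PySem.Int.mod (l.getD (k + 1) 0 + CInt l k) pvM
theorem PInt_cast (dp : List Int) (k : ℕ) :
    ((PInt dp k : Int) : ZMod 1000000007) = PfS (phiZ dp) k := by
  induction k with
  | zero => simp [PInt, PfS_zero]
  | succ k ih => rw [PInt, cast_pymod, Int.cast_add, ih, PfS_succ, phiZ]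
theorem PInt_bounds (dp : List Int) (k : ℕ) : 0 ≤ PInt dp k ∧ PInt dp k < pvM := by
  cases k with
  | zero => exact ⟨le_refl 0, pvM_pos⟩
  | succ k => exact ⟨PySem.Int.mod_nonneg _ pvM_pos, PySem.Int.mod_lt _ pvM_pos⟩
theorem CInt_cast (l : List Int) (k : ℕ) :
    ((CInt l k : Int) : ZMod 1000000007) = Cs (phiZ l) k := by
  induction k with
  | zero => show ((l.getD 0 0 : Int) : ZMod 1000000007) = PfS (phiZ l) 1
            rw [PfS_succ, PfS_zero, zero_add]; rfl
  | succ k ih =>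
    rw [CInt, cast_pymod, Int.cast_add, ih]
    show (phiZ l (k + 1)) + Cs (phiZ l) k = Cs (phiZ l) (k + 1)
    have h2 : PfS (phiZ l) (k + 1 + 1) = PfS (phiZ l) (k + 1) + phiZ l (k + 1) := PfS_succ _ _
    rw [Cs, Cs, h2]; ring
theorem CInt_bounds (l : List Int) (hl : InR l) (k : ℕ) :
    0 ≤ CInt l k ∧ CInt l k < pvM := by
  cases k with
  | zero => exact hl 0
  | succ k => exact ⟨PySem.Int.mod_nonneg _ pvM_pos, PySem.Int.mod_lt _ pvM_pos⟩

-- generic ascending write-only fold (A's window loop)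
theorem foldl_write (F : Int → Int) :
    ∀ (n : ℕ) (l : List Int), n ≤ l.length →
      (((List.range n).map (fun k : ℕ => (k : Int))).foldl
          (fun acc i => acc.set i.toNat (F i)) l).length = l.length ∧
      ∀ k : ℕ, (((List.range n).map (fun k : ℕ => (k : Int))).foldl
          (fun acc i => acc.set i.toNat (F i)) l).getD k 0
        = if k < n then F k else l.getD k 0 := by
  intro n
  induction n with
  | zero => intro l hl; exact ⟨rfl, fun k => by simp⟩
  | succ n ih =>
    intro l hl
    obtain ⟨hlen, hget⟩ := ih l (by omega)
    rw [List.range_succ, List.map_append, List.foldl_append]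
    simp only [List.map_cons, List.map_nil, List.foldl_cons, List.foldl_nil, Int.toNat_natCast]
    refine ⟨by rw [List.length_set, hlen], ?_⟩
    intro k
    rw [getD_set', hlen, hget]
    by_cases hk : k = n
    · subst hk; simp; omega
    · by_cases hk2 : k < n <;> simp [hk2] <;> omega

-- A's prefix loop
theorem prefAux (dp : List Int) :
    ∀ (n : ℕ) (pf : List Int), pf.length = dp.length + 1 → pf.getD 0 0 = 0 → n ≤ dp.length →
      (((List.range n).map (fun k : ℕ => (k : Int))).foldl
          (fun pf i => pf.set (i + 1).toNat
            (PySem.Int.mod (pf.getD i.toNat 0 + dp.getD i.toNat 0) pvM)) pf).length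
        = dp.length + 1 ∧
      ∀ k : ℕ, (((List.range n).map (fun k : ℕ => (k : Int))).foldl
          (fun pf i => pf.set (i + 1).toNat
            (PySem.Int.mod (pf.getD i.toNat 0 + dp.getD i.toNat 0) pvM)) pf).getD k 0
        = if k ≤ n then PInt dp k else pf.getD k 0 := by
  intro n
  induction n with
  | zero =>
    intro pf hpf h0 hn
    refine ⟨hpf, fun k => ?_⟩
    simp only [List.range_zero, List.map_nil, List.foldl_nil]
    by_cases hk : k = 0
    · subst hk; rw [if_pos (le_refl 0), show PInt dp 0 = 0 from rfl]; exact h0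
    · rw [if_neg (by omega)]
  | succ n ih =>
    intro pf hpf h0 hn
    obtain ⟨hlen, hget⟩ := ih pf hpf h0 (by omega)
    rw [List.range_succ, List.map_append, List.foldl_append]
    simp only [List.map_cons, List.map_nil, List.foldl_cons, List.foldl_nil, Int.toNat_natCast]
    rw [show ((n : Int) + 1).toNat = n + 1 by omega]
    refine ⟨by rw [List.length_set, hlen], ?_⟩
    intro k
    rw [getD_set', hlen, hget, hget]
    rw [if_pos (le_refl n)]
    by_cases hk : k = n + 1
    · subst hk
      rw [if_pos ⟨rfl, by omega⟩, if_pos (by omega)]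
      rfl
    · rw [if_neg (by omega)]
      by_cases hk2 : k ≤ n
      · rw [if_pos hk2, if_pos (by omega)]
      · rw [if_neg hk2, if_neg (by omega)]

-- B's descending subtract-shift loop
theorem subAux (g : Int) (hg : 0 ≤ g) (s : ℕ) :
    ∀ (m : ℕ) (l : List Int), s < l.length → (m : Int) ≤ (s : Int) + 1 - g →
      (((List.range m).map (fun k : ℕ => (s : Int) - k)).foldl
          (fun p i => p.set i.toNat
            (PySem.Int.mod (p.getD i.toNat 0 - p.getD (i - g).toNat 0) pvM)) l).length
        = l.length ∧
      ∀ k : ℕ, (((List.range m).map (fun k : ℕ => (s : Int) - k)).foldl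
          (fun p i => p.set i.toNat
            (PySem.Int.mod (p.getD i.toNat 0 - p.getD (i - g).toNat 0) pvM)) l).getD k 0
        = if (s : Int) - m < k ∧ k ≤ s
            then PySem.Int.mod (l.getD k 0 - l.getD (k - g.toNat) 0) pvM
            else l.getD k 0 := by
  intro m
  induction m with
  | zero =>
    intro l hs hm
    refine ⟨rfl, fun k => ?_⟩
    simp only [List.range_zero, List.map_nil, List.foldl_nil]
    rw [if_neg (by push_cast; omega)]
  | succ m ih =>
    intro l hs hm
    obtain ⟨hlen, hget⟩ := ih l hs (by push_cast at hm ⊢; omega)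
    rw [List.range_succ, List.map_append, List.foldl_append]
    simp only [List.map_cons, List.map_nil, List.foldl_cons, List.foldl_nil]
    have e1 : ((s : Int) - (m : ℕ)).toNat = s - m := by push_cast at hm; omega
    have e2 : ((s : Int) - (m : ℕ) - g).toNat = s - m - g.toNat := by push_cast at hm; omega
    rw [e1, e2, hget, hget]
    rw [if_neg (by push_cast at hm ⊢; omega), if_neg (by push_cast at hm ⊢; omega)]
    refine ⟨by rw [List.length_set, hlen], ?_⟩
    intro k
    rw [getD_set', hlen, hget]
    have hms : m ≤ s := by push_cast at hm; omega
    by_cases hk : k = s - m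
    · subst hk
      rw [if_pos ⟨rfl, by omega⟩, if_pos (by push_cast; omega)]
    · rw [if_neg (by omega)]
      by_cases hk2 : (s : Int) - (m : ℕ) < (k : ℕ) ∧ k ≤ s
      · rw [if_pos hk2, if_pos (by push_cast at hk2 ⊢; omega)]
      · rw [if_neg hk2, if_neg (by push_cast at hk2 ⊢; omega)]

-- B's cumulative-sum loop
theorem cumAux (l : List Int) :
    ∀ (m : ℕ), m + 1 ≤ l.length →
      (((List.range m).map (fun k : ℕ => (1 : Int) + k)).foldl
          (fun p i => p.set i.toNat
            (PySem.Int.mod (p.getD i.toNat 0 + p.getD (i - 1).toNat 0) pvM)) l).length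
        = l.length ∧
      ∀ k : ℕ, (((List.range m).map (fun k : ℕ => (1 : Int) + k)).foldl
          (fun p i => p.set i.toNat
            (PySem.Int.mod (p.getD i.toNat 0 + p.getD (i - 1).toNat 0) pvM)) l).getD k 0
        = if 1 ≤ k ∧ k ≤ m then CInt l k else l.getD k 0 := by
  intro m
  induction m with
  | zero =>
    intro hm
    refine ⟨rfl, fun k => ?_⟩
    simp only [List.range_zero, List.map_nil, List.foldl_nil]
    rw [if_neg (by omega)]
  | succ m ih =>
    intro hm
    obtain ⟨hlen, hget⟩ := ih (by omega)
    rw [List.range_succ, List.map_append, List.foldl_append]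
    simp only [List.map_cons, List.map_nil, List.foldl_cons, List.foldl_nil]
    have e1 : ((1 : Int) + (m : ℕ)).toNat = m + 1 := by omega
    have e2 : ((1 : Int) + (m : ℕ) - 1).toNat = m := by omega
    rw [e1, e2, hget, hget]
    rw [if_neg (by omega)]
    have hcm : (if 1 ≤ m ∧ m ≤ m then CInt l m else l.getD m 0) = CInt l m := by
      cases m with
      | zero => rw [if_neg (by omega)]; rfl
      | succ m => rw [if_pos (by omega)]
    rw [hcm]
    refine ⟨by rw [List.length_set, hlen], ?_⟩
    intro k
    rw [getD_set', hlen, hget]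
    by_cases hk : k = m + 1
    · subst hk
      rw [if_pos ⟨rfl, by omega⟩, if_pos (by omega)]
      rfl
    · rw [if_neg (by omega)]
      by_cases hk2 : 1 ≤ k ∧ k ≤ m
      · rw [if_pos hk2, if_pos (by omega)]
      · rw [if_neg hk2, if_neg (by omega)]

-- one group step of A computes the window operator Ws
theorem getD_long (l : List Int) (k : ℕ) (h : l.length ≤ k) : l.getD k 0 = 0 :=
  List.getD_eq_default _ _ h

theorem stepA_char (g : Int) (hg : 0 ≤ g) (dp nd pf : List Int)
    (hnd : nd.length = dp.length) (hpf : pf.length = dp.length + 1) :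
    (pvPrefLoop dp (pf.set 0 0)).length = dp.length + 1 ∧
    (pvWinLoop dp (pvPrefLoop dp (pf.set 0 0)) (g - 1) nd).length = dp.length ∧
    InR (pvWinLoop dp (pvPrefLoop dp (pf.set 0 0)) (g - 1) nd) ∧
    ∀ i, i < dp.length →
      phiZ (pvWinLoop dp (pvPrefLoop dp (pf.set 0 0)) (g - 1) nd) i = Ws g.toNat (phiZ dp) i := by
  have hPR : PySem.List.pyRange 0 (dp.length : Int) 1
      = (List.range dp.length).map (fun k : ℕ => (k : Int)) := by
    rw [PySem.List.pyRange_one]; simp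
  have hpf0 : (pf.set 0 0).length = dp.length + 1 := by rw [List.length_set, hpf]
  have h00 : (pf.set 0 0).getD 0 0 = 0 := by rw [getD_set', if_pos ⟨rfl, by omega⟩]
  obtain ⟨hplen, hpget⟩ := prefAux dp dp.length (pf.set 0 0) hpf0 h00 (le_refl _)
  have hPLdef : pvPrefLoop dp (pf.set 0 0)
      = ((List.range dp.length).map (fun k : ℕ => (k : Int))).foldl
          (fun pf i => pf.set (i + 1).toNat
            (PySem.Int.mod (pf.getD i.toNat 0 + dp.getD i.toNat 0) pvM)) (pf.set 0 0) := by
    rw [pvPrefLoop, hPR]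
  have hplen' : (pvPrefLoop dp (pf.set 0 0)).length = dp.length + 1 := by
    rw [hPLdef]; exact hplen
  have hpget' : ∀ k, k ≤ dp.length → (pvPrefLoop dp (pf.set 0 0)).getD k 0 = PInt dp k := by
    intro k hk; rw [hPLdef, hpget, if_pos hk]
  refine ⟨hplen', ?_⟩
  set pfr := pvPrefLoop dp (pf.set 0 0) with hpfr
  set F : Int → Int := fun i =>
    let left := i - (g - 1)
    let left := if left < 0 then 0 else left
    let val := pfr.getD (i + 1).toNat 0 - pfr.getD left.toNat 0
    if val < 0 then val + pvM else val with hF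
  obtain ⟨hwlen, hwget⟩ := foldl_write F dp.length nd (by omega)
  have hWLdef : pvWinLoop dp pfr (g - 1) nd
      = ((List.range dp.length).map (fun k : ℕ => (k : Int))).foldl
          (fun acc i => acc.set i.toNat (F i)) nd := by
    rw [pvWinLoop, hPR]
  have hval : ∀ i : ℕ, i < dp.length →
      F (i : Int) = (if PInt dp (i + 1) - PInt dp (i + 1 - g.toNat) < 0
        then PInt dp (i + 1) - PInt dp (i + 1 - g.toNat) + pvM
        else PInt dp (i + 1) - PInt dp (i + 1 - g.toNat)) := by
    intro i hi
    rw [hF]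
    show (let left := (i : Int) - (g - 1)
          let left := if left < 0 then 0 else left
          let val := pfr.getD ((i : Int) + 1).toNat 0 - pfr.getD left.toNat 0
          if val < 0 then val + pvM else val) = _
    have e1 : ((i : Int) + 1).toNat = i + 1 := by omega
    have e2 : (if (i : Int) - (g - 1) < 0 then 0 else (i : Int) - (g - 1)).toNat
        = i + 1 - g.toNat := by split_ifs <;> omega
    simp only [e1, e2]
    rw [hpget' (i + 1) (by omega), hpget' (i + 1 - g.toNat) (by omega)]
  have hlen2 : (pvWinLoop dp pfr (g - 1) nd).length = dp.length := by
    rw [hWLdef, hwlen, hnd]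
  refine ⟨hlen2, ?_, ?_⟩
  · intro k
    by_cases hk : k < dp.length
    · rw [hWLdef, hwget, if_pos hk, hval k hk]
      obtain ⟨b1, b2⟩ := PInt_bounds dp (k + 1)
      obtain ⟨b3, b4⟩ := PInt_bounds dp (k + 1 - g.toNat)
      split_ifs <;> omega
    · rw [getD_long _ _ (by omega)]
      exact ⟨le_refl 0, pvM_pos⟩
  · intro i hi
    rw [phiZ, hWLdef, hwget, if_pos hi, hval i hi]
    have hcast : ((if PInt dp (i + 1) - PInt dp (i + 1 - g.toNat) < 0
        then PInt dp (i + 1) - PInt dp (i + 1 - g.toNat) + pvM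
        else PInt dp (i + 1) - PInt dp (i + 1 - g.toNat) : Int) : ZMod 1000000007)
        = ((PInt dp (i + 1) : Int) : ZMod 1000000007)
          - ((PInt dp (i + 1 - g.toNat) : Int) : ZMod 1000000007) := by
      split_ifs
      · push_cast [castM_zero]
        ring
      · push_cast
        ring
    rw [hcast, PInt_cast, PInt_cast, Ws]

-- one numerator pass of B computes the subtract-shift operator Ss
theorem subStep_char (g : Int) (hg : 0 ≤ g) (L : Int) (p : List Int)
    (hL : p.length = L.toNat) (h1 : 1 ≤ L) (hp : InR p) :
    (pvSubLoop L g p).length = L.toNat ∧ InR (pvSubLoop L g p) ∧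
    ∀ i, i < L.toNat → phiZ (pvSubLoop L g p) i = Ss g.toNat (phiZ p) i := by
  set s := (L - 1).toNat with hsdef
  have hs : (L - 1 : Int) = (s : Int) := by omega
  have hSL : pvSubLoop L g p
      = ((List.range ((L - 1) - (g - 1)).toNat).map (fun k : ℕ => (s : Int) - k)).foldl
          (fun p i => p.set i.toNat
            (PySem.Int.mod (p.getD i.toNat 0 - p.getD (i - g).toNat 0) pvM)) p := by
    rw [pvSubLoop, PySem.List.pyRange_neg_one, hs]
  by_cases hgL : g ≤ L
  · have hm : (((L - 1 - (g - 1)).toNat : ℕ) : Int) ≤ (s : Int) + 1 - g := by omega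
    obtain ⟨hlen, hget⟩ := subAux g hg s ((L - 1) - (g - 1)).toNat p (by omega) hm
    refine ⟨by rw [hSL, hlen, hL], ?_, ?_⟩
    · intro k
      by_cases hk : k < L.toNat
      · rw [hSL, hget]
        split_ifs with hc
        · exact pymod_bounds _
        · exact hp k
      · rw [getD_long _ _ (by rw [hSL, hlen]; omega)]
        exact ⟨le_refl 0, pvM_pos⟩
    · intro i hi
      rw [phiZ, hSL, hget]
      by_cases hgi : g.toNat ≤ i
      · rw [if_pos ⟨by omega, by omega⟩, cast_pymod]
        rw [Ss]
        simp only [if_pos hgi]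
        push_cast
        rfl
      · rw [if_neg (by omega), Ss]
        simp only [if_neg hgi, sub_zero]
        rfl
  · have hm0 : ((L - 1) - (g - 1)).toNat = 0 := by omega
    have hre : pvSubLoop L g p = p := by
      rw [hSL, hm0]; rfl
    rw [hre]
    refine ⟨hL, hp, fun i hi => ?_⟩
    rw [Ss]
    simp only [if_neg (show ¬ g.toNat ≤ i by omega), sub_zero]

-- one division pass of B computes the cumulative-sum operator Cs
theorem cumStep_char (L : Int) (p : List Int)
    (hL : p.length = L.toNat) (h1 : 1 ≤ L) (hp : InR p) :
    (pvCumLoop L p).length = L.toNat ∧ InR (pvCumLoop L p) ∧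
    ∀ i, i < L.toNat → phiZ (pvCumLoop L p) i = Cs (phiZ p) i := by
  have hCL : pvCumLoop L p
      = ((List.range (L - 1).toNat).map (fun k : ℕ => (1 : Int) + k)).foldl
          (fun p i => p.set i.toNat
            (PySem.Int.mod (p.getD i.toNat 0 + p.getD (i - 1).toNat 0) pvM)) p := by
    rw [pvCumLoop, PySem.List.pyRange_one]
  obtain ⟨hlen, hget⟩ := cumAux p (L - 1).toNat (by omega)
  refine ⟨by rw [hCL, hlen, hL], ?_, ?_⟩
  · intro k
    by_cases hk : k < L.toNat
    · rw [hCL, hget]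
      split_ifs with hc
      · exact CInt_bounds p hp k
      · exact hp k
    · rw [getD_long _ _ (by rw [hCL, hlen]; omega)]
      exact ⟨le_refl 0, pvM_pos⟩
  · intro i hi
    rw [phiZ, hCL, hget]
    by_cases hi1 : 1 ≤ i
    · rw [if_pos ⟨hi1, by omega⟩]
      exact CInt_cast p i
    · have hi0 : i = 0 := by omega
      subst hi0
      rw [if_neg (by omega), Cs, PfS_succ, PfS_zero, zero_add]
      rfl

-- A's fold over the groups
theorem Afold (gs : List Int) (hgs : ∀ g ∈ gs, 0 ≤ g) :
    ∀ (dp nd pf : List Int) (q : ℕ → ZMod 1000000007) (Lc : ℕ),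
      dp.length = Lc → nd.length = Lc → pf.length = Lc + 1 → InR dp → Agr Lc (phiZ dp) q →
      (gs.foldl (fun (st : (List Int × List Int) × List Int) g =>
          ((pvWinLoop st.1.1 (pvPrefLoop st.1.1 (st.2.set 0 0)) (g - 1) st.1.2, st.1.1),
            pvPrefLoop st.1.1 (st.2.set 0 0))) ((dp, nd), pf)).1.1.length = Lc ∧
      (gs.foldl (fun (st : (List Int × List Int) × List Int) g =>
          ((pvWinLoop st.1.1 (pvPrefLoop st.1.1 (st.2.set 0 0)) (g - 1) st.1.2, st.1.1),
            pvPrefLoop st.1.1 (st.2.set 0 0))) ((dp, nd), pf)).1.2.length = Lc ∧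
      (gs.foldl (fun (st : (List Int × List Int) × List Int) g =>
          ((pvWinLoop st.1.1 (pvPrefLoop st.1.1 (st.2.set 0 0)) (g - 1) st.1.2, st.1.1),
            pvPrefLoop st.1.1 (st.2.set 0 0))) ((dp, nd), pf)).2.length = Lc + 1 ∧
      InR (gs.foldl (fun (st : (List Int × List Int) × List Int) g =>
          ((pvWinLoop st.1.1 (pvPrefLoop st.1.1 (st.2.set 0 0)) (g - 1) st.1.2, st.1.1),
            pvPrefLoop st.1.1 (st.2.set 0 0))) ((dp, nd), pf)).1.1 ∧
      Agr Lc (phiZ (gs.foldl (fun (st : (List Int × List Int) × List Int) g =>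
          ((pvWinLoop st.1.1 (pvPrefLoop st.1.1 (st.2.set 0 0)) (g - 1) st.1.2, st.1.1),
            pvPrefLoop st.1.1 (st.2.set 0 0))) ((dp, nd), pf)).1.1)
        (gs.foldl (fun q g => Ws g.toNat q) q) := by
  induction gs with
  | nil => exact fun dp nd pf q Lc h1 h2 h3 h4 h5 => ⟨h1, h2, h3, h4, h5⟩
  | cons g tl ih =>
    intro dp nd pf q Lc h1 h2 h3 h4 h5
    simp only [List.foldl_cons]
    have hg : 0 ≤ g := hgs g (List.mem_cons_self ..)
    obtain ⟨hPlen, hWlen, hWInR, hWphi⟩ := stepA_char g hg dp nd pf (by omega) (by omega)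
    exact ih (fun x hx => hgs x (List.mem_cons_of_mem _ hx)) _ dp _ (Ws g.toNat q) Lc
      (by omega) h1 (by omega) hWInR
      (fun i hi => (hWphi i (by omega)).trans (Agr_Ws h5 g.toNat i hi))

-- B's numerator fold over the groups
theorem BfoldS (gs : List Int) (hgs : ∀ g ∈ gs, 0 ≤ g) :
    ∀ (p : List Int) (q : ℕ → ZMod 1000000007) (L : Int),
      p.length = L.toNat → 1 ≤ L → InR p → Agr L.toNat (phiZ p) q →
      (gs.foldl (fun p g => pvSubLoop L g p) p).length = L.toNat ∧
      InR (gs.foldl (fun p g => pvSubLoop L g p) p) ∧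
      Agr L.toNat (phiZ (gs.foldl (fun p g => pvSubLoop L g p) p))
        (gs.foldl (fun q g => Ss g.toNat q) q) := by
  induction gs with
  | nil => exact fun p q L h1 h2 h3 h4 => ⟨h1, h3, h4⟩
  | cons g tl ih =>
    intro p q L h1 h2 h3 h4
    simp only [List.foldl_cons]
    have hg : 0 ≤ g := hgs g (List.mem_cons_self ..)
    obtain ⟨hlen, hInR, hphi⟩ := subStep_char g hg L p h1 h2 h3
    exact ih (fun x hx => hgs x (List.mem_cons_of_mem _ hx)) _ (Ss g.toNat q) L
      hlen h2 hInR (fun i hi => (hphi i hi).trans (Agr_Ss h4 g.toNat i hi))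

-- B's n division passes
theorem BfoldC (is : List Int) :
    ∀ (p : List Int) (q : ℕ → ZMod 1000000007) (L : Int),
      p.length = L.toNat → 1 ≤ L → InR p → Agr L.toNat (phiZ p) q →
      (is.foldl (fun p _ => pvCumLoop L p) p).length = L.toNat ∧
      InR (is.foldl (fun p _ => pvCumLoop L p) p) ∧
      Agr L.toNat (phiZ (is.foldl (fun p _ => pvCumLoop L p) p)) (Cs^[is.length] q) := by
  induction is with
  | nil => exact fun p q L h1 h2 h3 h4 => ⟨h1, h3, h4⟩
  | cons x tl ih =>
    intro p q L h1 h2 h3 h4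
    simp only [List.foldl_cons, List.length_cons]
    obtain ⟨hlen, hInR, hphi⟩ := cumStep_char L p h1 h2 h3
    have h5 : Agr L.toNat (phiZ (pvCumLoop L p)) (Cs q) :=
      fun i hi => (hphi i hi).trans (Agr_Cs h4 i hi)
    obtain ⟨r1, r2, r3⟩ := ih (pvCumLoop L p) (Cs q) L hlen h2 hInR h5
    refine ⟨r1, r2, ?_⟩
    rw [show tl.length + 1 = tl.length + 1 from rfl, Function.iterate_succ_apply]
    exact r3

-- recover list equality from residue agreement plus range bounds
theorem eq_of_phi (a b : List Int) (hlen : a.length = b.length) (ha : InR a) (hb : InR b)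
    (h : ∀ i, i < a.length → phiZ a i = phiZ b i) : a = b := by
  apply List.ext_getElem hlen
  intro i hi1 hi2
  have hab := h i hi1
  rw [phiZ, phiZ, List.getD_eq_getElem _ _ hi1, List.getD_eq_getElem _ _ hi2] at hab
  have hA := ha i
  have hB := hb i
  rw [List.getD_eq_getElem _ _ hi1] at hA
  rw [List.getD_eq_getElem _ _ hi2] at hB
  have hmod : a[i] ≡ b[i] [ZMOD (1000000007 : ℕ)] := (ZMod.intCast_eq_intCast_iff _ _ _).mp hab
  have hmm : a[i] % ((1000000007 : ℕ) : Int) = b[i] % ((1000000007 : ℕ) : Int) := hmod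
  have hM : (pvM : Int) = 1000000007 := by norm_num [pvM]
  push_cast at hmm
  omega


theorem getD_repl (n k : ℕ) : (List.replicate n (0 : Int)).getD k 0 = 0 := by
  by_cases h : k < n
  · rw [List.getD_eq_getElem _ _ (by simpa using h)]
    simp
  · rw [getD_long _ _ (by simpa using le_of_not_gt h)]

-- ===== VERDICT (by name: the statement is the Claim_ definition above) =====
theorem groups_to_poly_spec : Claim_equal_groups_to_poly := by
  intro groups hdom hpre
  obtain ⟨hg, hsum⟩ := hpre
  show groups_to_poly groups = groups_to_poly_alt groups
  simp only [groups_to_poly, groups_to_poly_alt]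
  set ms := (groups.map (fun g => g - 1)).sum with hms
  have hinit : (List.replicate (ms + 1).toNat (0 : Int)).set 0 1
      = 1 :: List.replicate (ms + 1 - 1).toNat (0 : Int) := by
    rw [show (ms + 1).toNat = ms.toNat + 1 by omega, List.replicate_succ,
      List.set_cons_zero, show (ms + 1 - 1).toNat = ms.toNat by omega]
  have hpolyInR : InR (1 :: List.replicate (ms + 1 - 1).toNat (0 : Int)) := by
    intro k
    cases k with
    | zero => refine ⟨by norm_num, by norm_num [pvM]⟩
    | succ k => rw [List.getD_cons_succ, getD_repl]; exact ⟨le_refl 0, pvM_pos⟩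
  have hpolylen : (1 :: List.replicate (ms + 1 - 1).toNat (0 : Int)).length
      = (ms + 1).toNat := by simp; omega
  obtain ⟨hAlen, _, _, hAInR, hAphi⟩ := Afold groups hg
    ((List.replicate (ms + 1).toNat (0 : Int)).set 0 1)
    (List.replicate (ms + 1).toNat (0 : Int))
    (List.replicate (ms + 2).toNat (0 : Int))
    (phiZ ((List.replicate (ms + 1).toNat (0 : Int)).set 0 1))
    (ms + 1).toNat
    (by simp) (by simp) (by simp; omega)
    (by rw [hinit]; exact hpolyInR)
    (fun i hi => rfl)
  obtain ⟨hBl, hBInR, hBphi⟩ := BfoldS groups hg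
    (1 :: List.replicate (ms + 1 - 1).toNat (0 : Int))
    (phiZ (1 :: List.replicate (ms + 1 - 1).toNat (0 : Int)))
    (ms + 1) hpolylen (by omega) hpolyInR (fun i hi => rfl)
  obtain ⟨hCl, hCInR, hCphi⟩ := BfoldC (PySem.List.pyRange 0 (groups.length : Int) 1)
    (groups.foldl (fun p g => pvSubLoop (ms + 1) g p)
      (1 :: List.replicate (ms + 1 - 1).toNat (0 : Int)))
    (groups.foldl (fun q g => Ss g.toNat q)
      (phiZ (1 :: List.replicate (ms + 1 - 1).toNat (0 : Int))))
    (ms + 1) hBl (by omega) hBInR hBphi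
  have hcnt : (PySem.List.pyRange 0 (groups.length : Int) 1).length = groups.length := by
    rw [PySem.List.length_pyRange_one]; omega
  have hchain := chainWS groups 0
    (phiZ (1 :: List.replicate (ms + 1 - 1).toNat (0 : Int)))
  simp only [Function.iterate_zero, id_eq, zero_add] at hchain
  apply eq_of_phi _ _ (by rw [hAlen, hCl]) hAInR hCInR
  intro i hi
  rw [hAlen] at hi
  have hA := hAphi i hi
  have hC := hCphi i (by omega)
  have hphi0 : phiZ ((List.replicate (ms + 1).toNat (0 : Int)).set 0 1)
      = phiZ (1 :: List.replicate (ms + 1 - 1).toNat (0 : Int)) := by rw [hinit]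
  rw [hA, hphi0, hchain, hC, hcnt]
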